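-- pv_equiv track=rewrite | github.com/jdhalimi/cg-2026-winter-tools | bots/explorer.py | has_support
-- ===== SOURCE A (Python) =====
-- from typing import Dict, List, Optional, Set, Tuple
--
-- Coord = Tuple[int, int]
--
-- def has_support(body: List[Coord], solids: Set[Coord]) -> bool:
--     body_cells = set(body)
--     for x, y in body:
--         below = (x, y + 1)
--         if below in body_cells:
--             continue
--         if below in solids:
--             return True
--     return False
-- ===== SOURCE B (Python) =====
-- def has_support(body, solids):
--     # Scan the solids (not the body): a solid supports the body iff the cell
--     # directly above it is a body cell while the solid itself is not.
--     body_cells = set(body)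
--     return any((sx, sy - 1) in body_cells and (sx, sy) not in body_cells
--                for (sx, sy) in solids)
-- ===== Notes on version B (the rewrite author's own statement) =====
-- stated objective: alternative
-- what changed: B inverts the traversal: instead of scanning each body cell and testing whether the cell below it is a non-body solid, it scans the solids and tests whether the cell above each solid is a body cell (and the solid itself is not), i.e. it looks for the supporting contact from the solid's side.
import Mathlib
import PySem

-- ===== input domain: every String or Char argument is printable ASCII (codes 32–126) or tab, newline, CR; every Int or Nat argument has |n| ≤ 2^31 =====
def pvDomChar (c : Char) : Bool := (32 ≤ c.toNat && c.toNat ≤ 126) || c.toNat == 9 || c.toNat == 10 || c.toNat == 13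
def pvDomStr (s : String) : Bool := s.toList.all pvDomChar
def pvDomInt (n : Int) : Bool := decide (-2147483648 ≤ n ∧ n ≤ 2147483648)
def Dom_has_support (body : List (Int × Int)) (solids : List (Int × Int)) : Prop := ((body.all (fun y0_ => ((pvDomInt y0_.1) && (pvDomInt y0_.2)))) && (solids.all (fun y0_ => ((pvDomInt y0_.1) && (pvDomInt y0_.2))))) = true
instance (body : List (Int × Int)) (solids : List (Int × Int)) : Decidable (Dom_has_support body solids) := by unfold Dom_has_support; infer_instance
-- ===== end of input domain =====

-- B inverts the traversal: it scans the solids, looking for one whose cell above is a body cell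
-- and which is not itself a body cell; objective: alternative decomposition, same cost.

-- ===== PORT A =====
-- the 'for x, y in body' loop with 'continue' / early 'return True'
def hasSupportLoop (body_cells : PySem.Set (Int × Int)) (solids : List (Int × Int)) :
    List (Int × Int) → Bool
  | [] => false
  | (x, y) :: rest =>
    let below := (x, y + 1)
    if PySem.Set.contains body_cells below then hasSupportLoop body_cells solids rest
    else if PySem.Set.contains (PySem.Set.ofList solids) below then true
    else hasSupportLoop body_cells solids rest

def has_support (body : List (Int × Int)) (solids : List (Int × Int)) : Bool :=
  let body_cells := PySem.Set.ofList body
  hasSupportLoop body_cells solids body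

-- ===== PORT B =====
-- any((sx, sy - 1) in body_cells and (sx, sy) not in body_cells for (sx, sy) in solids)
def has_support_alt (body : List (Int × Int)) (solids : List (Int × Int)) : Bool :=
  let body_cells := PySem.Set.ofList body
  solids.any (fun s =>
    PySem.Set.contains body_cells (s.1, s.2 - 1) && !PySem.Set.contains body_cells (s.1, s.2))

-- ===== PRECONDITION & SPEC =====
def Spec_has_support (body : List (Int × Int)) (solids : List (Int × Int)) (out : Bool) : Prop := out = has_support_alt body solids
instance (body : List (Int × Int)) (solids : List (Int × Int)) (out : Bool) : Decidable (Spec_has_support body solids out) := by unfold Spec_has_support; infer_instance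

-- ===== CLAIM (what is proved, stated in full; the proofs are below) =====
def Claim_equal_has_support : Prop := ∀ (body : List (Int × Int)) (solids : List (Int × Int)), Dom_has_support body solids → Spec_has_support body solids (has_support body solids)

-- ===== LEMMAS AND PROOFS =====

-- A's loop returns true iff some scanned cell's below is outside the body set and inside solids
theorem hasSupportLoop_eq_true_iff (bc : PySem.Set (Int × Int)) (solids : List (Int × Int))
    (cells : List (Int × Int)) :
    hasSupportLoop bc solids cells = true ↔
      ∃ p ∈ cells, (p.1, p.2 + 1) ∉ bc ∧ (p.1, p.2 + 1) ∈ solids := by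
  induction cells with
  | nil => simp [hasSupportLoop]
  | cons hd tl ih =>
    obtain ⟨x, y⟩ := hd
    simp only [hasSupportLoop, List.mem_cons]
    split_ifs with h1 h2
    · rw [ih]
      constructor
      · rintro ⟨p, hp, h⟩; exact ⟨p, Or.inr hp, h⟩
      · rintro ⟨p, hp, hnb, hs⟩
        rcases hp with rfl | hp
        · exact absurd ((PySem.Set.contains_iff _ _).mp h1) hnb
        · exact ⟨p, hp, hnb, hs⟩
    · simp only [true_iff]
      refine ⟨(x, y), Or.inl rfl, ?_, ?_⟩
      · intro hm; exact h1 ((PySem.Set.contains_iff _ _).mpr hm)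
      · have := (PySem.Set.contains_iff _ _).mp h2
        rwa [PySem.Set.mem_ofList] at this
    · rw [ih]
      constructor
      · rintro ⟨p, hp, h⟩; exact ⟨p, Or.inr hp, h⟩
      · rintro ⟨p, hp, hnb, hs⟩
        rcases hp with rfl | hp
        · exact absurd ((PySem.Set.contains_iff _ _).mpr ((PySem.Set.mem_ofList _ _).mpr hs)) h2
        · exact ⟨p, hp, hnb, hs⟩

-- B returns true iff some solid has a body cell directly above it and is not a body cell itself
theorem has_support_alt_eq_true_iff (body solids : List (Int × Int)) :
    has_support_alt body solids = true ↔
      ∃ s ∈ solids, (s.1, s.2 - 1) ∈ PySem.Set.ofList body ∧ s ∉ PySem.Set.ofList body := by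
  unfold has_support_alt
  simp only [List.any_eq_true, Bool.and_eq_true, Bool.not_eq_true']
  constructor
  · rintro ⟨s, hs, hc, hnc⟩
    refine ⟨s, hs, (PySem.Set.contains_iff _ _).mp hc, ?_⟩
    intro hm
    have h2 : PySem.Set.contains (PySem.Set.ofList body) s = false := hnc
    rw [(PySem.Set.contains_iff _ _).mpr hm] at h2
    exact (Bool.not_eq_true true).mpr h2 rfl
  · rintro ⟨s, hs, ha, hnb⟩
    refine ⟨s, hs, (PySem.Set.contains_iff _ _).mpr ha, ?_⟩
    show PySem.Set.contains (PySem.Set.ofList body) s = false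
    cases h : PySem.Set.contains (PySem.Set.ofList body) s
    · rfl
    · exact absurd ((PySem.Set.contains_iff _ _).mp h) hnb

-- the two existentials describe the same supporting contact, seen from either side
theorem support_exists_iff (body solids : List (Int × Int)) :
    (∃ p ∈ body, (p.1, p.2 + 1) ∉ PySem.Set.ofList body ∧ (p.1, p.2 + 1) ∈ solids) ↔
      (∃ s ∈ solids, (s.1, s.2 - 1) ∈ PySem.Set.ofList body ∧ s ∉ PySem.Set.ofList body) := by
  constructor
  · rintro ⟨p, hp, hnb, hs⟩
    refine ⟨(p.1, p.2 + 1), hs, ?_, hnb⟩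
    simpa [PySem.Set.mem_ofList] using hp
  · rintro ⟨s, hs, ha, hnb⟩
    obtain ⟨x, y⟩ := s
    rw [PySem.Set.mem_ofList] at ha
    refine ⟨(x, y - 1), ha, ?_, ?_⟩
    · simpa using hnb
    · simpa using hs

-- ===== VERDICT (by name: the statement is the Claim_ definition above) =====
theorem has_support_spec : Claim_equal_has_support := by
  intro body solids _
  unfold Spec_has_support has_support
  rw [Bool.eq_iff_iff, hasSupportLoop_eq_true_iff, has_support_alt_eq_true_iff,
    support_exists_iff]
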